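-- pv_equiv track=rewrite | github.com/BityutskiyNA/python_basics_homework_lesson_2 | main.py | get_coordinates
-- ===== SOURCE A (Python) =====
-- def get_coordinates(point, iterations, variant):
--     """Функция возвращает координаты точек по горизонтали и вертикали в зависимости от варианта
--            Передаваемые параметры: iterations - количество итераций цикла зависит от длины ряда проигрыша
--                                    point - точка которую проверяем
--                                    variant - номер варианта расчета
--                                        1 - это диагональ с лево на право
--                                        2 - это диагональ с право на лево
--                                        3 - это горизонталь
--                                        4 - это вертикаль
--            Результат: если по точке есть ряд из 5 фигур одного вида то возвращает 1 если нет 0"""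
--     diagonal = [point]
--     x = 1
--     while x <= iterations:
--         if variant == 1:
--             diagonal.append((point[0] + x, point[1] + x))
--             diagonal.append((point[0] - x, point[1] - x))
--         elif variant == 2:
--             diagonal.append((point[0] + x, point[1] - x))
--             diagonal.append((point[0] - x, point[1] + x))
--         elif variant == 3:
--             diagonal.append((point[0], point[1] + x))
--             diagonal.append((point[0], point[1] - x))
--         elif variant == 4:
--             diagonal.append((point[0] + x, point[1]))
--             diagonal.append((point[0] - x, point[1]))
--         x = x + 1
--     diagonal.sort()
--     return diagonal
-- ===== SOURCE B (Python) =====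
-- def get_coordinates(point, iterations, variant):
--     dirs = {1: (1, 1), 2: (1, -1), 3: (0, 1), 4: (1, 0)}
--     if iterations < 1 or variant not in dirs:
--         return [point]
--     dx, dy = dirs[variant]
--     return [point if k == 0 else (point[0] + k * dx, point[1] + k * dy)
--             for k in range(-iterations, iterations + 1)]
-- ===== Notes on version B (the rewrite author's own statement) =====
-- stated objective: simpler
-- what changed: B maps each variant to a direction vector via a small table and emits the 2*iterations+1 points in one ascending pass (k from -iterations to iterations), which is already in sorted order, replacing A's 4-way if/elif loop that appends two points per iteration and then sorts.
import Mathlib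
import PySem

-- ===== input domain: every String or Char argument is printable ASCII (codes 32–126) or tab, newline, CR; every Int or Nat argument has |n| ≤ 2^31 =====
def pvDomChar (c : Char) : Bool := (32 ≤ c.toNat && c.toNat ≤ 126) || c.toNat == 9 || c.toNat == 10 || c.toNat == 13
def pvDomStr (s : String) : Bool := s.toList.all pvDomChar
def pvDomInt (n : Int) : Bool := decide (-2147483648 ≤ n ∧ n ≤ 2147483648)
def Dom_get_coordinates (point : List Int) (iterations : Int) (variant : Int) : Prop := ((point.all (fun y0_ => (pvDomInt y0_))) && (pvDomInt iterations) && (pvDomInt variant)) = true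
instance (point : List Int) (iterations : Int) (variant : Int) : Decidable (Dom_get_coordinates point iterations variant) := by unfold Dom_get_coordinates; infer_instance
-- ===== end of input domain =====

-- B replaces A's 4-way branch loop + sort() by a direction-vector table and one
-- ascending generation pass that needs no sort (objective: simpler).

-- ===== PORT A =====
-- one iteration of A's while-body: the two appends of the chosen branch
-- (point[0]/point[1] are total here via getD; inside Pre_ the loop only runs when point has ≥ 2 elements, where pyGet? is `some`)
def pvStepA (point : List Int) (variant : Int) (diagonal : List (List Int)) (x : Int) : List (List Int) :=
  let p0 := (PySem.List.pyGet? point 0).getD 0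
  let p1 := (PySem.List.pyGet? point 1).getD 0
  if variant = 1 then diagonal ++ [[p0 + x, p1 + x], [p0 - x, p1 - x]]
  else if variant = 2 then diagonal ++ [[p0 + x, p1 - x], [p0 - x, p1 + x]]
  else if variant = 3 then diagonal ++ [[p0, p1 + x], [p0, p1 - x]]
  else if variant = 4 then diagonal ++ [[p0 + x, p1], [p0 - x, p1]]
  else diagonal

-- `while x <= iterations: … ; x = x + 1`
def pvLoopA (point : List Int) (iterations : Int) (variant : Int) (diagonal : List (List Int)) (x : Int) : List (List Int) :=
  if _h : x ≤ iterations then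
    pvLoopA point iterations variant (pvStepA point variant diagonal x) (x + 1)
  else diagonal
termination_by (iterations + 1 - x).toNat
decreasing_by omega

def get_coordinates (point : List Int) (iterations : Int) (variant : Int) : List (List Int) :=
  PySem.List.sorted (pvLoopA point iterations variant [point] 1) (fun y => y) false

-- ===== PORT B =====
def pvDirs : PySem.Dict Int (Int × Int) := PySem.Dict.ofList [(1, (1, 1)), (2, (1, -1)), (3, (0, 1)), (4, (1, 0))]

def get_coordinates_alt (point : List Int) (iterations : Int) (variant : Int) : List (List Int) :=
  if iterations < 1 then [point]
  else
    match PySem.Dict.get? pvDirs variant with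
    | none => [point]   -- `variant not in dirs`
    | some (dx, dy) =>
      -- point[0]/point[1] total via getD; Python raises IndexError when point is shorter (outside Pre_, where A raises too)
      let p0 := (PySem.List.pyGet? point 0).getD 0
      let p1 := (PySem.List.pyGet? point 1).getD 0
      (PySem.List.pyRange (-iterations) (iterations + 1) 1).map
        (fun k => if k = 0 then point else [p0 + k * dx, p1 + k * dy])

-- ===== PRECONDITION & SPEC =====
-- Pre_ excludes exactly the inputs where A raises IndexError (point[0]/point[1] on a
-- point with < 2 coordinates while the loop body runs); B raises IndexError there too.
def Pre_get_coordinates (point : List Int) (iterations : Int) (variant : Int) : Prop :=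
  iterations < 1 ∨ (variant ≠ 1 ∧ variant ≠ 2 ∧ variant ≠ 3 ∧ variant ≠ 4) ∨ 2 ≤ point.length
instance (point : List Int) (iterations : Int) (variant : Int) : Decidable (Pre_get_coordinates point iterations variant) := by unfold Pre_get_coordinates; infer_instance

def pvWitness_get_coordinates : List Int × Int × Int := ([3, 4], 2, 1)

def Spec_get_coordinates (point : List Int) (iterations : Int) (variant : Int) (out : List (List Int)) : Prop := out = get_coordinates_alt point iterations variant
instance (point : List Int) (iterations : Int) (variant : Int) (out : List (List Int)) : Decidable (Spec_get_coordinates point iterations variant out) := by unfold Spec_get_coordinates; infer_instance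

-- ===== CLAIM (what is proved, stated in full; the proofs are below) =====
def Claim_equal_get_coordinates : Prop := ∀ (point : List Int) (iterations : Int) (variant : Int), Dom_get_coordinates point iterations variant → Pre_get_coordinates point iterations variant → Spec_get_coordinates point iterations variant (get_coordinates point iterations variant)

-- ===== LEMMAS AND PROOFS =====

-- the two points A appends at step x, as a function of B's direction vector
def pvPair (p0 p1 dx dy x : Int) : List (List Int) :=
  [[p0 + x * dx, p1 + x * dy], [p0 - x * dx, p1 - x * dy]]

theorem pvDirs_spec (v dx dy : Int) (hd : PySem.Dict.get? pvDirs v = some (dx, dy)) :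
    v = 1 ∧ dx = 1 ∧ dy = 1 ∨ v = 2 ∧ dx = 1 ∧ dy = -1 ∨
    v = 3 ∧ dx = 0 ∧ dy = 1 ∨ v = 4 ∧ dx = 1 ∧ dy = 0 := by
  by_cases h1 : v = 1
  · subst h1
    rw [show PySem.Dict.get? pvDirs 1 = some ((1 : Int), (1 : Int)) from by decide] at hd
    simp only [Option.some.injEq, Prod.mk.injEq] at hd
    exact Or.inl ⟨rfl, hd.1.symm, hd.2.symm⟩
  by_cases h2 : v = 2
  · subst h2
    rw [show PySem.Dict.get? pvDirs 2 = some ((1 : Int), (-1 : Int)) from by decide] at hd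
    simp only [Option.some.injEq, Prod.mk.injEq] at hd
    exact Or.inr (Or.inl ⟨rfl, hd.1.symm, hd.2.symm⟩)
  by_cases h3 : v = 3
  · subst h3
    rw [show PySem.Dict.get? pvDirs 3 = some ((0 : Int), (1 : Int)) from by decide] at hd
    simp only [Option.some.injEq, Prod.mk.injEq] at hd
    exact Or.inr (Or.inr (Or.inl ⟨rfl, hd.1.symm, hd.2.symm⟩))
  by_cases h4 : v = 4
  · subst h4
    rw [show PySem.Dict.get? pvDirs 4 = some ((1 : Int), (0 : Int)) from by decide] at hd
    simp only [Option.some.injEq, Prod.mk.injEq] at hd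
    exact Or.inr (Or.inr (Or.inr ⟨rfl, hd.1.symm, hd.2.symm⟩))
  · exfalso
    simp [pvDirs, PySem.Dict.ofList, PySem.Dict.update, PySem.Dict.get?_insert, h1, h2, h3, h4] at hd

theorem pvLoopA_none (point : List Int) (iterations variant : Int) (diagonal : List (List Int)) (x : Int)
    (h1 : variant ≠ 1) (h2 : variant ≠ 2) (h3 : variant ≠ 3) (h4 : variant ≠ 4) :
    pvLoopA point iterations variant diagonal x = diagonal := by
  unfold pvLoopA
  split
  · rw [pvLoopA_none point iterations variant _ _ h1 h2 h3 h4]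
    simp [pvStepA, h1, h2, h3, h4]
  · rfl
termination_by (iterations + 1 - x).toNat
decreasing_by omega

theorem pvStepA_eq (point : List Int) (variant dx dy x : Int) (diagonal : List (List Int))
    (hd : PySem.Dict.get? pvDirs variant = some (dx, dy)) :
    pvStepA point variant diagonal x =
      diagonal ++ pvPair ((PySem.List.pyGet? point 0).getD 0) ((PySem.List.pyGet? point 1).getD 0) dx dy x := by
  rcases pvDirs_spec variant dx dy hd with ⟨hv, hx, hy⟩ | ⟨hv, hx, hy⟩ | ⟨hv, hx, hy⟩ | ⟨hv, hx, hy⟩ <;>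
    (subst hv; subst hx; subst hy; simp [pvStepA, pvPair]; try ring_nf)

theorem pvLoopA_flat (point : List Int) (iterations variant : Int) (diagonal : List (List Int)) (x : Int)
    (dx dy : Int) (hd : PySem.Dict.get? pvDirs variant = some (dx, dy)) :
    pvLoopA point iterations variant diagonal x =
      diagonal ++ (PySem.List.pyRange x (iterations + 1) 1).flatMap
        (pvPair ((PySem.List.pyGet? point 0).getD 0) ((PySem.List.pyGet? point 1).getD 0) dx dy) := by
  unfold pvLoopA
  split
  · next h =>
    rw [pvLoopA_flat point iterations variant _ _ dx dy hd,
        PySem.List.pyRange_one_cons (by omega : x < iterations + 1),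
        pvStepA_eq point variant dx dy x diagonal hd]
    simp
  · next h =>
    rw [PySem.List.pyRange_one_eq_nil (by omega : iterations + 1 ≤ x)]
    simp
termination_by (iterations + 1 - x).toNat
decreasing_by omega

-- B's ascending list is a permutation of `[point] ++` A's appended pairs
theorem pvPerm (point : List Int) (p0 p1 dx dy : Int) (n : Nat) :
    ((PySem.List.pyRange (-(n : Int)) ((n : Int) + 1) 1).map
        (fun k => if k = 0 then point else [p0 + k * dx, p1 + k * dy])).Perm
      ([point] ++ (PySem.List.pyRange 1 ((n : Int) + 1) 1).flatMap (pvPair p0 p1 dx dy)) := by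
  induction n with
  | zero =>
    rw [show (-((0 : Nat) : Int)) = 0 by norm_num, show (((0 : Nat) : Int) + 1) = 1 by norm_num,
        show PySem.List.pyRange 0 1 1 = [0] from by decide,
        show PySem.List.pyRange 1 1 1 = [] from by decide]
    simp
  | succ m ih =>
    have hcons : PySem.List.pyRange (-((m + 1 : Nat) : Int)) (((m + 1 : Nat) : Int) + 1) 1 =
        (-((m + 1 : Nat) : Int)) :: (PySem.List.pyRange (-(m : Int)) ((m : Int) + 1) 1 ++ [(m : Int) + 1]) := by
      rw [PySem.List.pyRange_one_cons (by push_cast; omega)]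
      rw [show (-((m + 1 : Nat) : Int) + 1) = -(m : Int) by push_cast; ring]
      rw [show (((m + 1 : Nat) : Int) + 1) = ((m : Int) + 1) + 1 by push_cast; ring]
      rw [PySem.List.pyRange_one_succ_right (by omega)]
    have hpos : PySem.List.pyRange 1 (((m + 1 : Nat) : Int) + 1) 1 =
        PySem.List.pyRange 1 ((m : Int) + 1) 1 ++ [(m : Int) + 1] := by
      rw [show (((m + 1 : Nat) : Int) + 1) = ((m : Int) + 1) + 1 by push_cast; ring]
      exact PySem.List.pyRange_one_succ_right (by omega)
    rw [hcons, hpos]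
    have hm1 : (-((m + 1 : Nat) : Int)) ≠ 0 := by push_cast; omega
    have hm2 : ((m : Int) + 1) ≠ 0 := by omega
    simp only [List.map_cons, List.map_append, List.flatMap_append, if_neg hm1, if_neg hm2,
      List.map_nil]
    have hneg : [p0 + (-((m + 1 : Nat) : Int)) * dx, p1 + (-((m + 1 : Nat) : Int)) * dy] =
        [p0 - ((m : Int) + 1) * dx, p1 - ((m : Int) + 1) * dy] := by
      have e1 : p0 + (-((m + 1 : Nat) : Int)) * dx = p0 - ((m : Int) + 1) * dx := by push_cast; ring
      have e2 : p1 + (-((m + 1 : Nat) : Int)) * dy = p1 - ((m : Int) + 1) * dy := by push_cast; ring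
      rw [e1, e2]
    rw [hneg]
    have hflat : [(m : Int) + 1].flatMap (pvPair p0 p1 dx dy) =
        [[p0 + ((m : Int) + 1) * dx, p1 + ((m : Int) + 1) * dy],
         [p0 - ((m : Int) + 1) * dx, p1 - ((m : Int) + 1) * dy]] := by
      simp [pvPair]
    rw [hflat]
    -- abbreviate
    set neg := [p0 - ((m : Int) + 1) * dx, p1 - ((m : Int) + 1) * dy] with hnegdef
    set pos := [p0 + ((m : Int) + 1) * dx, p1 + ((m : Int) + 1) * dy] with hposdef
    set mid := (PySem.List.pyRange (-(m : Int)) ((m : Int) + 1) 1).map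
        (fun k => if k = 0 then point else [p0 + k * dx, p1 + k * dy]) with hmiddef
    set flat := (PySem.List.pyRange 1 ((m : Int) + 1) 1).flatMap (pvPair p0 p1 dx dy) with hflatdef
    -- goal: neg :: (mid ++ [pos])  ~  [point] ++ (flat ++ [pos, neg])
    have s1 : (mid ++ [pos]).Perm (point :: (flat ++ [pos])) := by
      simpa using ih.append_right [pos]
    have s2 : (neg :: (mid ++ [pos])).Perm (neg :: point :: (flat ++ [pos])) := s1.cons neg
    have s3 : (neg :: point :: (flat ++ [pos])).Perm (point :: neg :: (flat ++ [pos])) :=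
      List.Perm.swap point neg _
    have s4 : (neg :: (flat ++ [pos])).Perm ((flat ++ [pos]) ++ [neg]) :=
      (List.perm_append_singleton neg (flat ++ [pos])).symm
    have s5 : ((neg :: (mid ++ [pos]))).Perm (point :: ((flat ++ [pos]) ++ [neg])) :=
      (s2.trans s3).trans (s4.cons point)
    simpa [List.append_assoc] using s5

-- strict monotonicity of B's generator in k (lex order on List Int)
theorem pvMono (point : List Int) (p0 p1 dx dy : Int) (rest : List Int) (hpt : point = p0 :: p1 :: rest)
    (hdir : dx = 1 ∧ (dy = 1 ∨ dy = -1 ∨ dy = 0) ∨ dx = 0 ∧ dy = 1)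
    (k k' : Int) (hkk : k < k') :
    (if k = 0 then point else [p0 + k * dx, p1 + k * dy]) <
      (if k' = 0 then point else [p0 + k' * dx, p1 + k' * dy]) := by
  subst hpt
  show List.lt _ _
  rw [List.lt_iff_lex_lt]
  by_cases h0 : k = 0
  · by_cases h0' : k' = 0
    · omega
    · rw [if_pos h0, if_neg h0']
      subst h0
      rcases hdir with ⟨h1, _⟩ | ⟨h1, h2⟩
      · subst h1; exact List.Lex.rel (by omega)
      · subst h1; subst h2
        rw [show p0 + k' * 0 = p0 by ring]
        exact List.Lex.cons (List.Lex.rel (by omega))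
  · by_cases h0' : k' = 0
    · rw [if_neg h0, if_pos h0']
      subst h0'
      rcases hdir with ⟨h1, _⟩ | ⟨h1, h2⟩
      · subst h1; exact List.Lex.rel (by omega)
      · subst h1; subst h2
        rw [show p0 + k * 0 = p0 by ring]
        exact List.Lex.cons (List.Lex.rel (by omega))
    · rw [if_neg h0, if_neg h0']
      rcases hdir with ⟨h1, _⟩ | ⟨h1, h2⟩
      · subst h1; exact List.Lex.rel (by omega)
      · subst h1; subst h2
        rw [show p0 + k * 0 = p0 by ring, show p0 + k' * 0 = p0 by ring]
        exact List.Lex.cons (List.Lex.rel (by omega))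

-- bridge the default List-lex order instances to the LinearOrder form sorted_eq_of_perm_of_pairwise_lt uses
theorem pvSortedEq (xs ys : List (List Int)) (h1 : ys.Perm xs) (h2 : ys.Pairwise (· < ·)) :
    PySem.List.sorted xs (fun y => y) false = ys := by
  have h : (fun (a b : List Int) => a.decidableLT b) = (LinearOrder.toDecidableLT : DecidableLT (List Int)) := by
    funext a b; exact Subsingleton.elim _ _
  rw [show ((fun (a b : List Int) => a.decidableLT b) : DecidableLT (List Int)) = LinearOrder.toDecidableLT from h]
  exact PySem.List.sorted_eq_of_perm_of_pairwise_lt _ _ _ h1 h2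

-- ===== VERDICT (by name: the statement is the Claim_ definition above) =====
theorem get_coordinates_spec : Claim_equal_get_coordinates := by
  intro point iterations variant _hdom hpre
  unfold Spec_get_coordinates get_coordinates get_coordinates_alt
  by_cases hit : iterations < 1
  · rw [if_pos hit]
    unfold pvLoopA
    rw [dif_neg (by omega)]
    rfl
  · rw [if_neg hit]
    cases hd : PySem.Dict.get? pvDirs variant with
    | none =>
      have hv : variant ≠ 1 ∧ variant ≠ 2 ∧ variant ≠ 3 ∧ variant ≠ 4 := by
        refine ⟨?_, ?_, ?_, ?_⟩ <;> (rintro rfl; revert hd; decide)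
      rw [pvLoopA_none point iterations variant _ _ hv.1 hv.2.1 hv.2.2.1 hv.2.2.2]
      rfl
    | some d =>
      obtain ⟨dx, dy⟩ := d
      have hv1 := pvDirs_spec variant dx dy hd
      have hlen : 2 ≤ point.length := by
        rcases hpre with h | h | h
        · omega
        · exact absurd hv1 (by rcases h with ⟨a, b, c, d⟩; rintro (⟨hv, _⟩ | ⟨hv, _⟩ | ⟨hv, _⟩ | ⟨hv, _⟩) <;> [exact a hv; exact b hv; exact c hv; exact d hv])
        · exact h
      obtain ⟨p0, p1, rest, hpt⟩ : ∃ a b r, point = a :: b :: r := by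
        match point, hlen with
        | a :: b :: r, _ => exact ⟨a, b, r, rfl⟩
      have hp0 : (PySem.List.pyGet? point 0).getD 0 = p0 := by
        subst hpt
        have h01 : (0 : Int) ≤ (rest.length : Int) + 1 := by omega
        simp [PySem.List.pyGet?, PySem.List.pyIdx?, h01]
      have hp1 : (PySem.List.pyGet? point 1).getD 0 = p1 := by
        subst hpt
        simp [PySem.List.pyGet?, PySem.List.pyIdx?]
      have hdir : dx = 1 ∧ (dy = 1 ∨ dy = -1 ∨ dy = 0) ∨ dx = 0 ∧ dy = 1 := by
        rcases hv1 with ⟨_, hx, hy⟩ | ⟨_, hx, hy⟩ | ⟨_, hx, hy⟩ | ⟨_, hx, hy⟩ <;> subst hx <;> subst hy <;> simp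
      rw [pvLoopA_flat point iterations variant _ _ dx dy hd]
      obtain ⟨n, hn⟩ : ∃ n : Nat, iterations = (n : Int) := ⟨iterations.toNat, by omega⟩
      subst hn
      simp only [hp0, hp1]
      refine pvSortedEq _ _ ?_ ?_
      · exact pvPerm point p0 p1 dx dy n
      · refine List.Pairwise.map _ (fun a b hab => pvMono point p0 p1 dx dy rest hpt hdir a b hab) ?_
        exact PySem.List.pairwise_lt_pyRange_one (-(n : Int)) ((n : Int) + 1)
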